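-- pv_equiv track=rewrite | github.com/PatoLocos/Erdos530 | compare_fpga.py | verify_sidon
-- ===== SOURCE A (Python) =====
-- def verify_sidon(S):
--     S = sorted(S)
--     sums = set()
--     for i in range(len(S)):
--         for j in range(i, len(S)):
--             s = S[i] + S[j]
--             if s in sums:
--                 return False
--             sums.add(s)
--     return True
-- ===== SOURCE B (Python) =====
-- def verify_sidon(S):
--     T = sorted(S)
--     sums = sorted(x + y for i, x in enumerate(T) for y in T[i:])
--     return all(a != b for a, b in zip(sums, sums[1:]))
-- ===== Notes on version B (the rewrite author's own statement) =====
-- stated objective: alternative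
-- what changed: A detects a repeated pairwise sum with an incrementally maintained hash set and an early return inside nested index loops; B uses no set at all: it generates all i<=j sums, sorts them, and decides the answer by a single adjacent-pair scan of the sorted list (sort-then-scan duplicate detection instead of hashing).
import Mathlib
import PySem

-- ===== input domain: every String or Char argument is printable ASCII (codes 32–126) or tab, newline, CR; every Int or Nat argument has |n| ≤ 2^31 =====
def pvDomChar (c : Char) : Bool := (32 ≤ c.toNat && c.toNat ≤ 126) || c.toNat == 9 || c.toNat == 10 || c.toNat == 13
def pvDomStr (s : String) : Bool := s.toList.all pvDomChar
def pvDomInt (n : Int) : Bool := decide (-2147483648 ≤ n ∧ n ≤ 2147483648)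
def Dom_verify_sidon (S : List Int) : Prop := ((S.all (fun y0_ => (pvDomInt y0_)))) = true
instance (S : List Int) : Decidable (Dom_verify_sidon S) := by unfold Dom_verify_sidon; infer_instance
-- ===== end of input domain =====

-- B uses no set: it sorts the list of all i<=j pairwise sums and decides by one adjacent-pair
-- scan (sort-then-scan duplicate detection), instead of A's incremental hash set with early return.

-- ===== PORT A =====
-- inner loop: for j in range(i, len(S)): s = S[i]+S[j]; if s in sums: return False; sums.add(s)
-- returns none where A returns False, some sums where the inner loop finishes
def vsInner (S : List Int) (i : Nat) (j : Nat) (sums : PySem.Set Int) : Option (PySem.Set Int) :=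
  if _h : j < S.length then
    -- s = S[i] + S[j]
    if PySem.Set.contains sums (PySem.List.pyGetD S (i : Int) 0 + PySem.List.pyGetD S (j : Int) 0) then none
    else vsInner S i (j + 1) (PySem.Set.add sums (PySem.List.pyGetD S (i : Int) 0 + PySem.List.pyGetD S (j : Int) 0))
  else some sums
termination_by S.length - j

-- outer loop: for i in range(len(S)): …
def vsOuter (S : List Int) (i : Nat) (sums : PySem.Set Int) : Bool :=
  if _h : i < S.length then
    match vsInner S i i sums with
    | none => false
    | some sums' => vsOuter S (i + 1) sums'
  else true
termination_by S.length - i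

def verify_sidon (S : List Int) : Bool :=
  vsOuter (PySem.List.sorted S (fun x => x) false) 0 PySem.Set.empty

-- ===== PORT B =====
def verify_sidon_alt (S : List Int) : Bool :=
  let T := PySem.List.sorted S (fun x => x) false
  -- sums = sorted(x + y for i, x in enumerate(T) for y in T[i:])
  let sums := PySem.List.sorted
    ((PySem.List.enumerate T 0).flatMap
      (fun p => (PySem.List.slice T (some p.1) none).map (fun y => p.2 + y)))
    (fun x => x) false
  -- all(a != b for a, b in zip(sums, sums[1:]))
  (sums.zip (PySem.List.slice sums (some 1) none)).all (fun p => p.1 != p.2)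

-- ===== PRECONDITION & SPEC =====
def Spec_verify_sidon (S : List Int) (out : Bool) : Prop := out = verify_sidon_alt S
instance (S : List Int) (out : Bool) : Decidable (Spec_verify_sidon S out) := by unfold Spec_verify_sidon; infer_instance

-- ===== CLAIM (what is proved, stated in full; the proofs are below) =====
def Claim_equal_verify_sidon : Prop := ∀ (S : List Int), Dom_verify_sidon S → Spec_verify_sidon S (verify_sidon S)

-- ===== LEMMAS AND PROOFS =====

-- "scan a list, fail at the first element already seen" — characterises A's interleaved loops
def vsScan (l : List Int) (s : PySem.Set Int) : Option (PySem.Set Int) :=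
  match l with
  | [] => some s
  | x :: rest => if PySem.Set.contains s x then none else vsScan rest (PySem.Set.add s x)

-- all sums x+y over i<=j pairs of l, in A's traversal order
def vsAllSums (l : List Int) : List Int :=
  match l with
  | [] => []
  | x :: xs => (x :: xs).map (fun y => x + y) ++ vsAllSums xs

lemma vsScan_append (l1 l2 : List Int) (s : PySem.Set Int) :
    vsScan (l1 ++ l2) s = (vsScan l1 s).bind (fun s' => vsScan l2 s') := by
  induction l1 generalizing s with
  | nil => simp [vsScan]
  | cons x rest ih =>
    simp only [List.cons_append, vsScan]
    split <;> simp [ih]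

lemma vsInner_eq (S : List Int) (i : Nat) (j : Nat) (sums : PySem.Set Int) :
    vsInner S i j sums =
      vsScan ((S.drop j).map (fun y => PySem.List.pyGetD S (i : Int) 0 + y)) sums := by
  fun_induction vsInner S i j sums with
  | case1 j sums h hc =>
    rw [List.drop_eq_getElem_cons h]
    simp only [List.map_cons, vsScan]
    rw [if_pos]
    have hx : PySem.List.pyGetD S (j : Int) 0 = S[j] := by
      simp [PySem.List.pyGetD_natCast, List.getD_eq_getElem?_getD, List.getElem?_eq_getElem h]
    rw [← hx]; exact hc
  | case2 j sums h hc ih =>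
    rw [List.drop_eq_getElem_cons h]
    simp only [List.map_cons, vsScan]
    have hx : PySem.List.pyGetD S (j : Int) 0 = S[j] := by
      simp [PySem.List.pyGetD_natCast, List.getD_eq_getElem?_getD, List.getElem?_eq_getElem h]
    rw [if_neg (by rw [← hx]; exact hc), ← hx]
    exact ih
  | case3 j sums h =>
    rw [List.drop_eq_nil_of_le (by omega)]
    simp [vsScan]

lemma vsOuter_eq (S : List Int) (i : Nat) (sums : PySem.Set Int) :
    vsOuter S i sums = (vsScan (vsAllSums (S.drop i)) sums).isSome := by
  fun_induction vsOuter S i sums with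
  | case1 i sums h hinner =>
    rw [List.drop_eq_getElem_cons h]
    simp only [vsAllSums]
    rw [vsScan_append]
    have hx : PySem.List.pyGetD S (i : Int) 0 = S[i] := by
      simp [PySem.List.pyGetD_natCast, List.getD_eq_getElem?_getD, List.getElem?_eq_getElem h]
    have hi := vsInner_eq S i i sums
    rw [List.drop_eq_getElem_cons h, hx, hinner] at hi
    rw [← hi]
    simp
  | case2 i sums h sums' hinner ih =>
    rw [List.drop_eq_getElem_cons h]
    simp only [vsAllSums]
    rw [vsScan_append]
    have hx : PySem.List.pyGetD S (i : Int) 0 = S[i] := by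
      simp [PySem.List.pyGetD_natCast, List.getD_eq_getElem?_getD, List.getElem?_eq_getElem h]
    have hi := vsInner_eq S i i sums
    rw [List.drop_eq_getElem_cons h, hx, hinner] at hi
    rw [← hi]
    simpa using ih
  | case3 i sums h =>
    rw [List.drop_eq_nil_of_le (by omega)]
    simp [vsAllSums, vsScan]

-- B's comprehension over (enumerate, suffix slice) produces exactly vsAllSums
lemma vsEnum_flat (U : List Int) : ∀ (k : Nat) (T : List Int), T.drop k = U →
    (PySem.List.enumerate U (k : Int)).flatMap
      (fun p => (PySem.List.slice T (some p.1) none).map (fun y => p.2 + y)) = vsAllSums U := by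
  induction U with
  | nil => intro k T _; simp [PySem.List.enumerate, vsAllSums]
  | cons x xs ih =>
    intro k T hdrop
    rw [PySem.List.enumerate_cons]
    simp only [List.flatMap_cons]
    have h1 : PySem.List.slice T (some (k : Int)) none = x :: xs := by
      rw [PySem.List.slice_from T (by positivity), Int.toNat_natCast, hdrop]
    have h2 : T.drop (k + 1) = xs := by
      rw [← List.drop_drop, hdrop]; rfl
    have h3 : ((k : Int) + 1) = ((k + 1 : Nat) : Int) := by push_cast; ring
    rw [h1, h3, ih (k + 1) T h2]
    simp [vsAllSums]

-- A's scan succeeds iff the scanned list has no duplicates (and none of its elements is seen yet)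
lemma vsScan_isSome_iff (l : List Int) (s : PySem.Set Int) :
    (vsScan l s).isSome ↔ l.Nodup ∧ ∀ x ∈ l, ¬ x ∈ s := by
  induction l generalizing s with
  | nil => simp [vsScan]
  | cons x rest ih =>
    simp only [vsScan]
    by_cases hc : PySem.Set.contains s x
    · rw [if_pos hc]
      simp only [Option.isSome_none, Bool.false_eq_true, false_iff]
      intro ⟨_, hall⟩
      exact hall x (by simp) ((PySem.Set.contains_iff s x).mp hc)
    · rw [if_neg hc, ih]
      have hxs : ¬ x ∈ s := fun hm => hc ((PySem.Set.contains_iff s x).mpr hm)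
      constructor
      · intro ⟨hnd, hall⟩
        refine ⟨List.nodup_cons.mpr ⟨fun hm => (hall x hm ((PySem.Set.mem_add s x x).mpr (Or.inr rfl))), hnd⟩, ?_⟩
        intro y hy
        rcases List.mem_cons.mp hy with rfl | hy
        · exact hxs
        · intro hys
          exact hall y hy ((PySem.Set.mem_add s x y).mpr (Or.inl hys))
      · intro ⟨hnd, hall⟩
        rcases List.nodup_cons.mp hnd with ⟨hxr, hndr⟩
        refine ⟨hndr, ?_⟩
        intro y hy hya
        rcases (PySem.Set.mem_add s x y).mp hya with hys | hyx
        · exact hall y (by simp [hy]) hys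
        · exact hxr (hyx ▸ hy)

-- on a ≤-sorted list, "no two adjacent elements equal" decides Nodup
lemma vsAdj_eq_nodup (l : List Int) (hp : l.Pairwise (· ≤ ·)) :
    ((l.zip (l.drop 1)).all (fun p => p.1 != p.2)) = decide l.Nodup := by
  induction l with
  | nil => simp
  | cons x rest ih =>
    rcases List.pairwise_cons.mp hp with ⟨hxle, hprest⟩
    cases rest with
    | nil => simp
    | cons y t =>
      simp only [List.drop_succ_cons, List.drop_zero, List.zip_cons_cons, List.all_cons]
      have ih' := ih hprest
      simp only [List.drop_succ_cons, List.drop_zero] at ih'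
      rw [ih']
      by_cases hxy : x = y
      · subst hxy
        simp [List.nodup_cons]
      · have hne : (x != y) = true := by simp [hxy]
        rw [hne, Bool.true_and, decide_eq_decide]
        have hxlt : x < y := lt_of_le_of_ne (hxle y (by simp)) hxy
        constructor
        · intro hnd
          refine List.nodup_cons.mpr ⟨?_, hnd⟩
          intro hm
          rcases List.mem_cons.mp hm with h | h
          · exact hxy h
          · rcases List.pairwise_cons.mp hprest with ⟨hyle, _⟩
            have := hyle x h
            omega
        · intro hnd
          exact (List.nodup_cons.mp hnd).2

-- ===== VERDICT (by name: the statement is the Claim_ definition above) =====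
theorem verify_sidon_spec : Claim_equal_verify_sidon := by
  intro S _
  unfold Spec_verify_sidon verify_sidon verify_sidon_alt
  dsimp only
  rw [vsOuter_eq, List.drop_zero]
  have he := vsEnum_flat (PySem.List.sorted S (fun x => x) false) 0
    (PySem.List.sorted S (fun x => x) false) (by simp)
  rw [Nat.cast_zero] at he
  rw [he]
  have h1 : PySem.List.slice
      (PySem.List.sorted (vsAllSums (PySem.List.sorted S (fun x => x) false)) (fun x => x) false)
      (some 1) none
      = (PySem.List.sorted (vsAllSums (PySem.List.sorted S (fun x => x) false)) (fun x => x) false).drop 1 := by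
    rw [PySem.List.slice_from _ (by norm_num)]
    norm_num
  rw [h1, vsAdj_eq_nodup _ (by simpa using PySem.List.sorted_pairwise ..)]
  have hperm := PySem.List.sorted_perm (vsAllSums (PySem.List.sorted S (fun x => x) false)) (fun x => x) false
  rw [Bool.eq_iff_iff, vsScan_isSome_iff]
  simp [hperm.nodup_iff, PySem.Set.empty]
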